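-- pv_equiv track=rewrite | github.com/RinLaboratory/Proxy-Logger | file/read_file.py | MERGE_FILE_LINES
-- ===== SOURCE A (Python) =====
-- def MERGE_FILE_LINES(lines: list[str]):
--         # El archivo posee lineas de enter que muestran mensajes de baneos y errores que deben
--         # ser filtrados y colocados como línea única antes de pasarlos por la db para no insertar basura.
--         merged_lines: list[str] = []
--         current_line = ""
--         for line in lines:
--             if line.startswith("["):
--                 if current_line:
--                     merged_lines.append(current_line.strip())
--                     current_line = ""
--             current_line += line.strip() + "\n"
--         if current_line:
--             merged_lines.append(current_line.strip())
--         return merged_lines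
-- ===== SOURCE B (Python) =====
-- def MERGE_FILE_LINES(lines: list[str]):
--     # B: scan-ahead decomposition — repeatedly cut off one block (head line plus
--     # following non-'[' lines), then join-and-strip each block.
--     blocks: list[str] = []
--     rest = lines
--     while rest:
--         i = 1
--         while i < len(rest) and not rest[i].startswith("["):
--             i += 1
--         group, rest = rest[:i], rest[i:]
--         blocks.append("\n".join(l.strip() for l in group).strip())
--     return blocks
-- ===== Notes on version B (the rewrite author's own statement) =====
-- stated objective: alternative
-- what changed: Replaces A's single pass with a running string accumulator flushed on '[' lines by a two-level decomposition: repeatedly cut one block off the front (head line plus following non-'[' lines), then produce each block as a join of the stripped lines, stripped.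
import Mathlib
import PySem

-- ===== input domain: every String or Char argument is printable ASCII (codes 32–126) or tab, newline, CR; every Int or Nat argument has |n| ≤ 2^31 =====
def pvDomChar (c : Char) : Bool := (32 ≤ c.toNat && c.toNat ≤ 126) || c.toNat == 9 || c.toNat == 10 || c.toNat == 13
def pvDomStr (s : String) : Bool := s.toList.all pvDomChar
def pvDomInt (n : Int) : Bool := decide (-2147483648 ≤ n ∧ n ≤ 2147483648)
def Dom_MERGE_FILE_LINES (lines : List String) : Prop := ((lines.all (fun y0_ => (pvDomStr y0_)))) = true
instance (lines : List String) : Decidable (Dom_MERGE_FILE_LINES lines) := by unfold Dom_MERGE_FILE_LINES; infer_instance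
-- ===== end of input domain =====

-- B replaces A's single running-accumulator loop by a scan-ahead decomposition (cut one block
-- off the front at a time, then join-and-strip each block); objective: alternative structure.

-- ===== PORT A =====
-- one loop iteration: flush current_line on a '[' line, then append the stripped line + "\n"
def pvStepA (st : List String × List Char) (line : String) : List String × List Char :=
  let st := if PySem.Str.startswith line "[" && !st.2.isEmpty
    then (st.1 ++ [String.mk (PySem.Chars.strip st.2)], ([] : List Char))
    else st
  (st.1, st.2 ++ (PySem.Chars.strip line.toList ++ ['\n']))

-- the final 'if current_line: merged_lines.append(current_line.strip())'
def pvFinishA (st : List String × List Char) : List String :=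
  if !st.2.isEmpty then st.1 ++ [String.mk (PySem.Chars.strip st.2)] else st.1

def MERGE_FILE_LINES (lines : List String) : List String :=
  pvFinishA (lines.foldl pvStepA ([], []))

-- ===== PORT B =====
-- Source B's block boundary test: the inner scan advances while the next line does NOT start with '['
def pvP (x : String) : Bool := !PySem.Str.startswith x "["

-- Source B's inner index scan 'rest[:i] / rest[i:]' (head line plus following non-'[' lines) is
-- exactly takeWhile / dropWhile on the tail
def MERGE_FILE_LINES_alt : List String → List String
  | [] => []
  | l :: ls =>
    String.mk (PySem.Chars.strip (PySem.Chars.join ['\n']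
        ((l :: ls.takeWhile pvP).map (fun x => PySem.Chars.strip x.toList))))
      :: MERGE_FILE_LINES_alt (ls.dropWhile pvP)
termination_by ls => ls.length
decreasing_by
  have := List.length_dropWhile_le pvP ls
  simp only [List.length_cons]
  omega

-- ===== PRECONDITION & SPEC =====
def Spec_MERGE_FILE_LINES (lines : List String) (out : List String) : Prop := out = MERGE_FILE_LINES_alt lines
instance (lines : List String) (out : List String) : Decidable (Spec_MERGE_FILE_LINES lines out) := by unfold Spec_MERGE_FILE_LINES; infer_instance

-- ===== CLAIM (what is proved, stated in full; the proofs are below) =====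
def Claim_equal_MERGE_FILE_LINES : Prop := ∀ (lines : List String), Dom_MERGE_FILE_LINES lines → Spec_MERGE_FILE_LINES lines (MERGE_FILE_LINES lines)

-- ===== LEMMAS AND PROOFS =====

-- the concatenation A's accumulator builds over a block
def pvCat (g : List String) : List Char :=
  (g.map (fun x => PySem.Chars.strip x.toList ++ ['\n'])).flatten

-- the join B computes over a block
def pvBody (g : List String) : List Char :=
  PySem.Chars.join ['\n'] (g.map (fun x => PySem.Chars.strip x.toList))

theorem pv_strip_append_newline (x : List Char) :
    PySem.Chars.strip (x ++ ['\n']) = PySem.Chars.strip x := by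
  have hns : PySem.Chars.isspace '\n' = true := by decide
  by_cases h : List.dropWhile PySem.Chars.isspace x = []
  · simp [PySem.Chars.strip, PySem.Chars.lstrip, List.dropWhile_append, h,
      PySem.Chars.rstrip, hns]
  · simp [PySem.Chars.strip, PySem.Chars.lstrip, List.dropWhile_append, h,
      PySem.Chars.rstrip, hns]

theorem pv_cat_eq_body (l : String) (g : List String) :
    pvCat (l :: g) = pvBody (l :: g) ++ ['\n'] := by
  induction g generalizing l with
  | nil => simp [pvCat, pvBody, PySem.Chars.join_singleton]
  | cons a g ih =>
    have h := ih a
    simp only [pvCat, pvBody, List.map_cons, List.flatten_cons,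
      PySem.Chars.join_cons_cons] at *
    simp [h]

theorem pv_alt_cons (l : String) (ls : List String) :
    MERGE_FILE_LINES_alt (l :: ls)
      = String.mk (PySem.Chars.strip (pvBody (l :: ls.takeWhile pvP)))
        :: MERGE_FILE_LINES_alt (ls.dropWhile pvP) := by
  rw [MERGE_FILE_LINES_alt, pvBody]

theorem pv_loopA (lines : List String) : ∀ (acc : List String) (cur : List Char), cur ≠ [] →
    pvFinishA (lines.foldl pvStepA (acc, cur))
      = acc ++ (String.mk (PySem.Chars.strip (cur ++ pvCat (lines.takeWhile pvP)))
          :: MERGE_FILE_LINES_alt (lines.dropWhile pvP)) := by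
  induction lines with
  | nil =>
    intro acc cur hcur
    simp [pvFinishA, pvCat, MERGE_FILE_LINES_alt, hcur]
  | cons l ls ih =>
    intro acc cur hcur
    by_cases h : PySem.Str.startswith l "[" = true
    · -- flush: a '[' line with a non-empty accumulator starts a new block
      have hstep : pvStepA (acc, cur) l
          = (acc ++ [String.mk (PySem.Chars.strip cur)], [] ++ (PySem.Chars.strip l.toList ++ ['\n'])) := by
        have h' : PySem.Chars.startswith l.toList ['['] = true := by simpa using h
        simp [pvStepA, h', hcur]
      rw [List.foldl_cons, hstep, ih _ _ (by simp)]
      rw [List.takeWhile_cons, List.dropWhile_cons]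
      simp only [pvP, h, Bool.not_true, Bool.false_eq_true, if_false, List.nil_append]
      rw [pv_alt_cons]
      have hcat : PySem.Chars.strip l.toList ++ ['\n'] ++ pvCat (ls.takeWhile pvP)
          = pvCat (l :: ls.takeWhile pvP) := by
        simp [pvCat]
      rw [hcat, pv_cat_eq_body, pv_strip_append_newline]
      simp [pvCat]
    · -- accumulate: the line joins the current block
      have hstep : pvStepA (acc, cur) l = (acc, cur ++ (PySem.Chars.strip l.toList ++ ['\n'])) := by
        have h' : PySem.Chars.startswith l.toList ['['] = false := by simpa using h
        simp [pvStepA, h']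
      rw [List.foldl_cons, hstep, ih _ _ (by simp [hcur])]
      rw [List.takeWhile_cons, List.dropWhile_cons]
      simp only [pvP, h, Bool.not_false, if_true]
      simp [pvCat]

theorem MERGE_FILE_LINES_eq_alt (lines : List String) :
    MERGE_FILE_LINES lines = MERGE_FILE_LINES_alt lines := by
  cases lines with
  | nil => simp [MERGE_FILE_LINES, pvFinishA, MERGE_FILE_LINES_alt]
  | cons l ls =>
    have hstep : pvStepA ([], []) l = ([], [] ++ (PySem.Chars.strip l.toList ++ ['\n'])) := by
      simp [pvStepA]
    rw [MERGE_FILE_LINES, List.foldl_cons, hstep, pv_loopA ls [] _ (by simp)]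
    rw [pv_alt_cons]
    have hcat : PySem.Chars.strip l.toList ++ ['\n'] ++ pvCat (ls.takeWhile pvP)
        = pvCat (l :: ls.takeWhile pvP) := by
      simp [pvCat]
    simp only [List.nil_append]
    rw [hcat, pv_cat_eq_body, pv_strip_append_newline]

-- ===== VERDICT (by name: the statement is the Claim_ definition above) =====
theorem MERGE_FILE_LINES_spec : Claim_equal_MERGE_FILE_LINES := by
  intro lines _
  unfold Spec_MERGE_FILE_LINES
  exact MERGE_FILE_LINES_eq_alt lines
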